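-- pv_equiv track=rewrite | github.com/QuadDarv1ne/maestro7it_education | codeforces/Codeforces Round 1042 (Div. 3)/A.py | count_iterations
-- ===== SOURCE A (Python) =====
-- def count_iterations(n, a, b):
--     """
--     Подсчитывает количество итераций, которые выполняет Рычаг,
--     преобразуя массив a в массив b согласно правилам задачи.
--
--     На каждой итерации:
--     1. Если есть индекс i с a[i] > b[i], уменьшаем a[i] на 1.
--        Если таких индексов нет, шаг пропускается.
--     2. Если есть индекс i с a[i] < b[i], увеличиваем a[i] на 1.
--        Если таких индексов нет, шаг пропускается.
--     Итерация считается выполненной, даже если первый шаг был пропущен,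
--     но после такой итерации процесс завершается.
--
--     Args:
--         n (int): длина массивов a и b.
--         a (list[int]): исходный массив.
--         b (list[int]): целевой массив.
--
--     Returns:
--         int: количество выполненных итераций.
--     """
--     a = a[:]  # копия массива
--     iterations = 0
--
--     while True:
--         idx_dec = next((i for i in range(n) if a[i] > b[i]), None)
--         if idx_dec is None:
--             # Шаг 1 пропущен — считаем эту итерацию и завершаем процесс
--             iterations += 1
--             break
--
--         a[idx_dec] -= 1
--
--         idx_inc = next((i for i in range(n) if a[i] < b[i]), None)
--         if idx_inc is not None:
--             a[idx_inc] += 1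
--
--         iterations += 1
--
--     return iterations
-- ===== SOURCE B (Python) =====
-- def count_iterations(n, a, b):
--     # Closed form: each iteration removes exactly one unit of excess
--     # (a[i] - b[i] when positive); the final iteration with skipped step 1
--     # adds one more.
--     total = 0
--     for i, (x, y) in enumerate(zip(a, b)):
--         if i < n:
--             total += x - y if x > y else 0
--     return total + 1
-- ===== Notes on version B (the rewrite author's own statement) =====
-- stated objective: faster
-- what changed: Replaced the unit-step simulation loop (repeatedly scan for an index with excess, decrement, rebalance) by a single closed-form pass: sum of positive surpluses a[i]-b[i] over the first n positions plus one.
import Mathlib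
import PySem

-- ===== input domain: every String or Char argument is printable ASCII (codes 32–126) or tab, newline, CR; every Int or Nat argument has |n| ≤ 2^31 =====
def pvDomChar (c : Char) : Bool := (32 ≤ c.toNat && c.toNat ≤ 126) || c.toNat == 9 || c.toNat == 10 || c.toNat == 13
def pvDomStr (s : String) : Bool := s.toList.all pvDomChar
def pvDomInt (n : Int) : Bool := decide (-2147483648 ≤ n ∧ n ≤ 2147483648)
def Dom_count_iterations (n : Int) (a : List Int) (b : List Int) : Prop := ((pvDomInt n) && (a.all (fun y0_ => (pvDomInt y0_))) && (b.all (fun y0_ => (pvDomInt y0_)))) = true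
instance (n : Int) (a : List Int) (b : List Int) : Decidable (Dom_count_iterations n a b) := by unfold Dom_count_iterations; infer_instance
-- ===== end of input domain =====

-- B replaces A's unit-step simulation loop by one closed-form pass (sum of the
-- positive surpluses a[i]-b[i] over the first n positions, plus one).

-- ===== PORT A =====

-- `next((i for i in range(n) if p(a[i], b[i])), None)`: walks the index list in
-- order; outer `none` = IndexError raised at the first out-of-range index reached.
def pvScan (p : Int → Int → Bool) (a b : List Int) : List Nat → Option (Option Nat)
  | [] => some none
  | i :: rest =>
    match a[i]?, b[i]? with
    | some x, some y => if p x y then some (some i) else pvScan p a b rest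
    | _, _ => none

-- total excess Σ_{i<n} max(0, a[i]-b[i]): the loop's termination measure
def pvExc (n : Int) (a b : List Int) : Int :=
  ((List.range n.toNat).map (fun i => if b.getD i 0 < a.getD i 0 then a.getD i 0 - b.getD i 0 else 0)).sum

-- loop body after idx_dec = i was found: a[idx_dec] -= 1, then the idx_inc scan
-- and conditional a[idx_inc] += 1
def pvStep (n : Int) (b a : List Int) (i : Nat) : List Int :=
  -- a1 = a after `a[idx_dec] -= 1`
  match pvScan (fun x y => x < y) (a.set i (a.getD i 0 - 1)) b (List.range n.toNat) with
  | none => a.set i (a.getD i 0 - 1)        -- Python raises IndexError here (outside Pre_)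
  | some none => a.set i (a.getD i 0 - 1)
  | some (some j) => (a.set i (a.getD i 0 - 1)).set j ((a.set i (a.getD i 0 - 1)).getD j 0 + 1)

theorem pvScan_some {p : Int → Int → Bool} {a b : List Int} {l : List Nat} {i : Nat}
    (h : pvScan p a b l = some (some i)) :
    i ∈ l ∧ ∃ x y, a[i]? = some x ∧ b[i]? = some y ∧ p x y = true := by
  induction l with
  | nil => simp [pvScan] at h
  | cons j rest ih =>
    unfold pvScan at h
    cases ha : a[j]? with
    | none => simp [ha] at h
    | some x =>
      cases hb : b[j]? with
      | none => simp [ha, hb] at h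
      | some y =>
        simp only [ha, hb] at h
        by_cases hp : p x y
        · simp [hp] at h; subst h; exact ⟨List.mem_cons_self, x, y, ha, hb, hp⟩
        · simp [hp] at h
          obtain ⟨hm, w⟩ := ih h
          exact ⟨List.mem_cons_of_mem _ hm, w⟩

theorem pvExc_nonneg (n : Int) (a b : List Int) : 0 ≤ pvExc n a b := by
  apply List.sum_nonneg
  intro x hx
  simp only [List.mem_map] at hx
  obtain ⟨i, _, rfl⟩ := hx
  split <;> omega

theorem pvExc_set (n : Int) (a b : List Int) (i : Nat) (hi : i < n.toNat) (hia : i < a.length) (v : Int) :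
    pvExc n (a.set i v) b =
      pvExc n a b - (if b.getD i 0 < a.getD i 0 then a.getD i 0 - b.getD i 0 else 0)
        + (if b.getD i 0 < v then v - b.getD i 0 else 0) := by
  unfold pvExc
  have hset : ∀ k : Nat, (a.set i v).getD k 0 = if i = k then v else a.getD k 0 := by
    intro k
    simp only [List.getD_eq_getElem?_getD, List.getElem?_set]
    split
    · next heq => subst heq; simp_all
    · rfl
  set m := n.toNat with hm
  have him : i < m := hi
  clear_value m
  clear hm hi
  induction m with
  | zero => omega
  | succ m ih =>
    rw [List.range_succ, List.map_append, List.map_append, List.sum_append, List.sum_append]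
    by_cases hlt : i < m
    · rw [ih hlt]
      have hne : i ≠ m := by omega
      simp only [List.map_cons, List.map_nil, List.sum_cons, List.sum_nil, hset m, if_neg hne]
      ring
    · have : i = m := by omega
      subst this
      simp only [List.map_cons, List.map_nil, List.sum_cons, List.sum_nil]
      have hcong : (List.range i).map (fun k => if b.getD k 0 < (a.set i v).getD k 0 then (a.set i v).getD k 0 - b.getD k 0 else 0)
          = (List.range i).map (fun k => if b.getD k 0 < a.getD k 0 then a.getD k 0 - b.getD k 0 else 0) := by
        apply List.map_congr_left
        intro k hk
        rw [List.mem_range] at hk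
        have hne : i ≠ k := by omega
        rw [hset k, if_neg hne]
      rw [hcong, hset i, if_pos rfl]
      ring


theorem pvExc_pvStep (n : Int) (a b : List Int) (i : Nat)
    (hdec : pvScan (fun x y => y < x) a b (List.range n.toNat) = some (some i)) :
    pvExc n (pvStep n b a i) b = pvExc n a b - 1 := by
  obtain ⟨hmem, x, y, hax, hby, hp⟩ := pvScan_some hdec
  rw [List.mem_range] at hmem
  have hia : i < a.length := (List.getElem?_eq_some_iff.mp hax).1
  have hxval : a.getD i 0 = x := by simp [List.getD_eq_getElem?_getD, hax]
  have hyval : b.getD i 0 = y := by simp [List.getD_eq_getElem?_getD, hby]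
  have hyx : y < x := by simpa using hp
  have h1 : pvExc n (a.set i (a.getD i 0 - 1)) b = pvExc n a b - 1 := by
    rw [pvExc_set n a b i hmem hia]
    rw [hxval, hyval]
    split_ifs <;> omega
  unfold pvStep
  split
  · exact h1
  · exact h1
  · next j hinc =>
      set a1 := a.set i (a.getD i 0 - 1) with ha1
      obtain ⟨hjm, x', y', hax', hby', hp'⟩ := pvScan_some hinc
      rw [List.mem_range] at hjm
      have hja : j < a1.length := (List.getElem?_eq_some_iff.mp hax').1
      have hxv' : a1.getD j 0 = x' := by simp [List.getD_eq_getElem?_getD, hax']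
      have hyv' : b.getD j 0 = y' := by simp [List.getD_eq_getElem?_getD, hby']
      have hxy' : x' < y' := by simpa using hp'
      rw [pvExc_set n a1 b j hjm hja, hxv', hyv', h1]
      split_ifs <;> omega

-- the Python `while True` loop
def pvLoopA (n : Int) (b : List Int) (a : List Int) (iters : Int) : Int :=
  match hdec : pvScan (fun x y => y < x) a b (List.range n.toNat) with
  | none => iters   -- Python raises IndexError here (outside Pre_)
  | some none => iters + 1
  | some (some i) => pvLoopA n b (pvStep n b a i) (iters + 1)
termination_by (pvExc n a b).toNat
decreasing_by
  have h := pvExc_pvStep n a b i hdec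
  have h0 := pvExc_nonneg n (pvStep n b a i) b
  omega

def count_iterations (n : Int) (a : List Int) (b : List Int) : Int :=
  -- a = a[:] (value semantics: the copy is the identity); iterations = 0; loop
  pvLoopA n b a 0

-- ===== PORT B =====

-- the `for i, (x, y) in enumerate(zip(a, b)):` loop with accumulator `total`
def pvAltGo (n : Int) (total : Int) : List (Int × (Int × Int)) → Int
  | [] => total
  | (i, (x, y)) :: rest =>
      pvAltGo n (if i < n then total + (if y < x then x - y else 0) else total) rest

def count_iterations_alt (n : Int) (a : List Int) (b : List Int) : Int :=
  pvAltGo n 0 (PySem.List.enumerate (a.zip b) 0) + 1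

-- ===== PRECONDITION & SPEC =====
-- Pre_ excludes exactly the inputs where A raises IndexError (n larger than
-- len(a) or len(b): the range(n) scan eventually reaches an out-of-range index);
-- A never returns a value outside Pre_.
def Pre_count_iterations (n : Int) (a : List Int) (b : List Int) : Prop :=
  n ≤ (a.length : Int) ∧ n ≤ (b.length : Int)
instance (n : Int) (a : List Int) (b : List Int) : Decidable (Pre_count_iterations n a b) := by unfold Pre_count_iterations; infer_instance
def pvWitness_count_iterations : Int × List Int × List Int := (2, [3, 1], [1, 2])

def Spec_count_iterations (n : Int) (a : List Int) (b : List Int) (out : Int) : Prop := out = count_iterations_alt n a b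
instance (n : Int) (a : List Int) (b : List Int) (out : Int) : Decidable (Spec_count_iterations n a b out) := by unfold Spec_count_iterations; infer_instance

-- ===== CLAIM (what is proved, stated in full; the proofs are below) =====
def Claim_equal_count_iterations : Prop := ∀ (n : Int) (a : List Int) (b : List Int), Dom_count_iterations n a b → Pre_count_iterations n a b → Spec_count_iterations n a b (count_iterations n a b)

-- ===== LEMMAS AND PROOFS =====

theorem pvStep_length (n : Int) (b a : List Int) (i : Nat) : (pvStep n b a i).length = a.length := by
  unfold pvStep
  split <;> simp

theorem pvScan_isSome (p : Int → Int → Bool) (a b : List Int) (l : List Nat)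
    (h : ∀ i ∈ l, i < a.length ∧ i < b.length) :
    pvScan p a b l ≠ none := by
  induction l with
  | nil => simp [pvScan]
  | cons j rest ih =>
    obtain ⟨hja, hjb⟩ := h j List.mem_cons_self
    unfold pvScan
    rw [List.getElem?_eq_getElem hja, List.getElem?_eq_getElem hjb]
    show (if p a[j] b[j] = true then some (some j) else pvScan p a b rest) ≠ none
    split
    · simp
    · exact ih (fun i hi => h i (List.mem_cons_of_mem _ hi))

theorem pvScan_none_all {p : Int → Int → Bool} {a b : List Int} {l : List Nat}
    (h : pvScan p a b l = some none) :
    ∀ i ∈ l, ∀ x y, a[i]? = some x → b[i]? = some y → p x y = false := by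
  induction l with
  | nil => simp
  | cons j rest ih =>
    intro i hi x y hx hy
    unfold pvScan at h
    cases ha : a[j]? with
    | none => simp [ha] at h
    | some x0 =>
      cases hb : b[j]? with
      | none => simp [ha, hb] at h
      | some y0 =>
        simp only [ha, hb] at h
        by_cases hp : p x0 y0
        · simp [hp] at h
        · simp [hp] at h
          rcases List.mem_cons.mp hi with rfl | hmem
          · rw [ha] at hx; rw [hb] at hy
            cases hx; cases hy
            simpa using hp
          · exact ih h i hmem x y hx hy

theorem pvLoopA_eq (n : Int) (b : List Int) (a : List Int) (iters : Int)
    (hla : n.toNat ≤ a.length) (hlb : n.toNat ≤ b.length) :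
    pvLoopA n b a iters = iters + pvExc n a b + 1 := by
  induction a, iters using pvLoopA.induct n b with
  | case1 a iters hdec =>
    exfalso
    refine pvScan_isSome _ a b (List.range n.toNat) ?_ hdec
    intro i hi
    rw [List.mem_range] at hi
    exact ⟨by omega, by omega⟩
  | case2 a iters hdec =>
    rw [pvLoopA, hdec]
    have hz : pvExc n a b = 0 := by
      unfold pvExc
      apply List.sum_eq_zero
      intro t ht
      simp only [List.mem_map, List.mem_range] at ht
      obtain ⟨i, hi, rfl⟩ := ht
      have hia : i < a.length := by omega
      have hib : i < b.length := by omega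
      have hnp := pvScan_none_all hdec i (List.mem_range.mpr hi) a[i] b[i]
        (List.getElem?_eq_getElem hia) (List.getElem?_eq_getElem hib)
      simp only [List.getD_eq_getElem?_getD, List.getElem?_eq_getElem hia,
        List.getElem?_eq_getElem hib, Option.getD_some]
      simp only [decide_eq_false_iff_not, not_lt] at hnp
      rw [if_neg (not_lt.mpr hnp)]
    rw [hz]; ring
  | case3 a iters i hdec ih =>
    rw [pvLoopA, hdec]
    have ih' := ih (by rw [pvStep_length]; omega)
    show pvLoopA n b (pvStep n b a i) (iters + 1) = iters + pvExc n a b + 1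
    rw [ih', pvExc_pvStep n a b i hdec]
    ring

-- the per-pair contribution of B's loop
def pvG (n : Int) (p : Int × (Int × Int)) : Int :=
  if p.1 < n then (if p.2.2 < p.2.1 then p.2.1 - p.2.2 else 0) else 0

theorem pvAltGo_eq (n : Int) (l : List (Int × (Int × Int))) (total : Int) :
    pvAltGo n total l = total + (l.map (pvG n)).sum := by
  induction l generalizing total with
  | nil => simp [pvAltGo]
  | cons p rest ih =>
    obtain ⟨i, x, y⟩ := p
    rw [pvAltGo, ih]
    simp only [List.map_cons, List.sum_cons, pvG]
    split_ifs <;> ring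

theorem pvEnum_sum (n : Int) (xs : List (Int × Int)) (s : Int) :
    ((PySem.List.enumerate xs s).map (pvG n)).sum
      = ((List.range xs.length).map (fun k : Nat => pvG n (s + (k : Int), xs.getD k (0, 0)))).sum := by
  induction xs generalizing s with
  | nil => simp [PySem.List.enumerate_nil]
  | cons p rest ih =>
    rw [PySem.List.enumerate_cons, List.map_cons, List.sum_cons, ih (s + 1)]
    simp only [List.length_cons, List.range_succ_eq_map, List.map_cons, List.sum_cons,
      List.map_map]
    congr 1
    · simp
    · apply congrArg
      apply List.map_congr_left
      intro k hk
      simp only [Function.comp_apply, List.getD_cons_succ]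
      congr 2
      push_cast
      ring

theorem pvSum_ite (T : Nat → Int) (m L : Nat) (h : m ≤ L) :
    ((List.range L).map (fun k => if k < m then T k else 0)).sum
      = ((List.range m).map T).sum := by
  induction L with
  | zero =>
    have : m = 0 := by omega
    subst this; simp
  | succ L ih =>
    by_cases hm : m ≤ L
    · rw [List.range_succ, List.map_append, List.sum_append, ih hm]
      simp [Nat.not_lt.mpr hm]
    · have : m = L + 1 := by omega
      subst this
      apply congrArg
      apply List.map_congr_left
      intro k hk
      rw [List.mem_range] at hk
      rw [if_pos hk]

theorem alt_eq_excess (n : Int) (a b : List Int)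
    (hla : n.toNat ≤ a.length) (hlb : n.toNat ≤ b.length) :
    count_iterations_alt n a b = pvExc n a b + 1 := by
  unfold count_iterations_alt
  rw [pvAltGo_eq, pvEnum_sum]
  have hcong : ((List.range (a.zip b).length).map (fun k : Nat => pvG n ((0 : Int) + (k : Int), (a.zip b).getD k (0, 0)))).sum
      = ((List.range (a.zip b).length).map (fun k =>
          if k < n.toNat then (if b.getD k 0 < a.getD k 0 then a.getD k 0 - b.getD k 0 else 0) else 0)).sum := by
    apply congrArg
    apply List.map_congr_left
    intro k hk
    rw [List.mem_range, List.length_zip] at hk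
    have hka : k < a.length := by omega
    have hkb : k < b.length := by omega
    have hz : (a.zip b).getD k (0, 0) = (a[k], b[k]) := by
      rw [List.getD_eq_getElem?_getD, List.getElem?_eq_getElem (by rw [List.length_zip]; omega)]
      simp
    rw [hz]
    simp only [pvG, zero_add]
    have hiff : ((k : Int) < n) = (k < n.toNat) := by
      apply propext; constructor <;> intro <;> omega
    simp only [List.getD_eq_getElem?_getD, List.getElem?_eq_getElem hka,
      List.getElem?_eq_getElem hkb, Option.getD_some, hiff]
  rw [hcong, pvSum_ite _ n.toNat _ (by rw [List.length_zip]; omega)]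
  unfold pvExc
  ring

-- ===== VERDICT (by name: the statement is the Claim_ definition above) =====
theorem count_iterations_spec : Claim_equal_count_iterations := by
  intro n a b _ hpre
  obtain ⟨h1, h2⟩ := hpre
  show count_iterations n a b = count_iterations_alt n a b
  rw [count_iterations, pvLoopA_eq n b a 0 (by omega) (by omega),
    alt_eq_excess n a b (by omega) (by omega)]
  ring
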